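-- pv_equiv track=rewrite | github.com/zoharno/chamon_decoder | chamdec_clusters_sweep.py | num_layers
-- ===== SOURCE A (Python) =====
-- def num_layers(aset, px):
--     # gives the number of layers in a axis
--     # the input is the values in the axis in the form of a set
--     max_dist = 0
--     layer_min = 0
--     layer_max = 0
--     for x1 in aset:
--         for x2 in aset:
--             dist_reg = abs(x1 - x2)  # regular distance
--             dist_boundary = abs(abs(x1 - x2) - 2 * px)  # distance through the boundary
--             if dist_reg <= dist_boundary:
--                 dist = dist_reg
--                 xmin = min(x1, x2)
--                 xmax = max(x1, x2)
--             else: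
--                 dist = dist_boundary
--                 xmin = max(x1, x2)
--                 xmax = min(x1,x2)
--             if dist > max_dist:  # update if larger than any other dist so far
--                 max_dist = dist
--                 layer_min = xmin
--                 layer_max = xmax
--     layers_num = max_dist + 1 # number of layers
--     return layers_num, layer_min, layer_max
-- ===== SOURCE B (Python) =====
-- def num_layers(aset, px):
--     # Two-pass scheme over the values in sorted order: a plain max reduction over
--     # all ordered pairs, then a first-match search for the endpoints of that maximum.
--     items = sorted(aset)
--
--     def d(x1, x2):
--         r = abs(x1 - x2)
--         return min(r, abs(r - 2 * px))
--
--     max_dist = max((d(x1, x2) for x1 in items for x2 in items), default=0)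
--     layer_min = 0
--     layer_max = 0
--     if max_dist > 0:
--         x1, x2 = next((x1, x2) for x1 in items for x2 in items
--                       if d(x1, x2) == max_dist)
--         r = abs(x1 - x2)
--         b = abs(r - 2 * px)
--         if r <= b:
--             layer_min, layer_max = min(x1, x2), max(x1, x2)
--         else:
--             layer_min, layer_max = max(x1, x2), min(x1, x2)
--     return max_dist + 1, layer_min, layer_max
-- ===== Notes on version B (the rewrite author's own statement) =====
-- stated objective: alternative
-- what changed: replaces the single fused fold that tracks (max_dist, endpoints) together with a two-pass scheme over the values in sorted order: a plain max reduction over all ordered pairs, then a first-match search for the pair achieving that maximum, from which the endpoints are computed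
-- outside the precondition, e.g. on num_layers({3, -1, -2}, 2): A returns (2, 3, -2), B returns (2, -2, -1)
import Mathlib
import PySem

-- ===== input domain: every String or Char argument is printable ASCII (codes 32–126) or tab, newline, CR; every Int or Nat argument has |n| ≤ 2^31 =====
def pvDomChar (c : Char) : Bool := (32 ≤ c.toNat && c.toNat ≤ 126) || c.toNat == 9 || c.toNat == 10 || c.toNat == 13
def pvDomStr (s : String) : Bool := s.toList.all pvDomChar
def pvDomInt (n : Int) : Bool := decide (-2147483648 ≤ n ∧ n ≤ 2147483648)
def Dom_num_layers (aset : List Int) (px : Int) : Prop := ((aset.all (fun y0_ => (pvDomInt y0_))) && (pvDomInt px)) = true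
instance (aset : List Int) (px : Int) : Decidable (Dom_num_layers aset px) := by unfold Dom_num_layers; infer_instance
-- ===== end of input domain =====

-- B replaces A's single fused (max, endpoints) fold by a two-pass scheme over the values in
-- sorted order: a max reduction over all pairs, then a first-match search for the endpoints.
-- Return-value equivalence; A's input is a Python set, so endpoint ties depend on its
-- iteration order — Pre_ excludes those order-dependent inputs.

-- ===== PORT A =====
-- literal transliteration: the nested for-loops become nested folds over the same state
def num_layers (aset : List Int) (px : Int) : Int × Int × Int :=
  let s :=
    aset.foldl (fun (st : Int × Int × Int) x1 =>
      aset.foldl (fun (st : Int × Int × Int) x2 =>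
        let dist_reg := |x1 - x2|
        let dist_boundary := |(|x1 - x2|) - 2 * px|
        let dxx : Int × Int × Int :=
          if dist_reg ≤ dist_boundary then (dist_reg, min x1 x2, max x1 x2)
          else (dist_boundary, max x1 x2, min x1 x2)
        if dxx.1 > st.1 then dxx else st) st) (0, 0, 0)
  (s.1 + 1, s.2.1, s.2.2)

-- ===== PORT B =====
-- Source B's helper d
def pvD (px x1 x2 : Int) : Int := min |x1 - x2| (|(|x1 - x2|) - 2 * px|)

-- the generator "for x1 in items for x2 in items" as a pair list
def pvPairs (l : List Int) : List (Int × Int) :=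
  l.flatMap (fun x1 => l.map (fun x2 => (x1, x2)))

def num_layers_alt (aset : List Int) (px : Int) : Int × Int × Int :=
  let items := PySem.List.sorted aset (fun x => x) false   -- items = sorted(aset)
  let pairs := pvPairs items
  -- max((d(x1,x2) for …), default=0)
  let max_dist := pairs.foldl (fun m p => max m (pvD px p.1 p.2)) 0
  let lminmax : Int × Int :=
    if max_dist > 0 then
      -- next(… first pair with d(x1,x2) == max_dist)
      match pairs.find? (fun p => pvD px p.1 p.2 == max_dist) with
      | some (x1, x2) =>
          let r := |x1 - x2|
          let b := |r - 2 * px|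
          if r ≤ b then (min x1 x2, max x1 x2) else (max x1 x2, min x1 x2)
      | none => (0, 0)
    else (0, 0)
  (max_dist + 1, lminmax.1, lminmax.2)

-- ===== PRECONDITION & SPEC =====
-- helpers for Pre_ only (they reach neither port): circular distance and A's endpoint rule
def pvCD (px x1 x2 : Int) : Int := min |x1 - x2| (|(|x1 - x2|) - 2 * px|)
def pvEnds (px x1 x2 : Int) : Int × Int :=
  if |x1 - x2| ≤ |(|x1 - x2|) - 2 * px| then (min x1 x2, max x1 x2) else (max x1 x2, min x1 x2)

-- A's input is a Python SET: when several pairs attain the maximal circular distance with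
-- different endpoints, A's returned endpoints depend on the accidental set-iteration order
-- (unrepresentable for the list port); Pre_ excludes exactly those ambiguous inputs.
def Pre_num_layers (aset : List Int) (px : Int) : Prop :=
  ∀ x1 ∈ aset, ∀ x2 ∈ aset, ∀ y1 ∈ aset, ∀ y2 ∈ aset,
    (pvCD px x1 x2 = pvCD px y1 y2 ∧ ∀ z1 ∈ aset, ∀ z2 ∈ aset, pvCD px z1 z2 ≤ pvCD px x1 x2) →
    pvEnds px x1 x2 = pvEnds px y1 y2
instance (aset : List Int) (px : Int) : Decidable (Pre_num_layers aset px) := by unfold Pre_num_layers; infer_instance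

def pvWitness_num_layers : List Int × Int := ([0, 5], 3)

def Spec_num_layers (aset : List Int) (px : Int) (out : Int × Int × Int) : Prop := out = num_layers_alt aset px
instance (aset : List Int) (px : Int) (out : Int × Int × Int) : Decidable (Spec_num_layers aset px out) := by unfold Spec_num_layers; infer_instance

-- ===== CLAIM (what is proved, stated in full; the proofs are below) =====
def Claim_equal_num_layers : Prop := ∀ (aset : List Int) (px : Int), Dom_num_layers aset px → Pre_num_layers aset px → Spec_num_layers aset px (num_layers aset px)

-- ===== LEMMAS AND PROOFS =====

-- A's per-pair step, for the invariant (its endpoint rule is pvEnds)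
def pvStep (px : Int) (st : Int × Int × Int) (p : Int × Int) : Int × Int × Int :=
  if pvD px p.1 p.2 > st.1 then (pvD px p.1 p.2, pvEnds px p.1 p.2) else st

lemma le_foldl_max (px : Int) (L : List (Int × Int)) (m : Int) :
    m ≤ L.foldl (fun m p => max m (pvD px p.1 p.2)) m := by
  induction L generalizing m with
  | nil => simp
  | cons p t ih => exact le_trans (le_max_left _ _) (ih _)

lemma foldl_max_ge (px : Int) (L : List (Int × Int)) (m : Int) :
    ∀ q ∈ L, pvD px q.1 q.2 ≤ L.foldl (fun m p => max m (pvD px p.1 p.2)) m := by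
  induction L generalizing m with
  | nil => intro q hq; simp at hq
  | cons p t ih =>
    intro q hq
    rcases List.mem_cons.mp hq with h | h
    · subst h
      exact le_trans (le_max_right _ _) (le_foldl_max px t _)
    · exact ih _ q h

lemma foldl_max_mem (px : Int) (L : List (Int × Int)) (m : Int) :
    L.foldl (fun m p => max m (pvD px p.1 p.2)) m = m ∨
    ∃ p ∈ L, pvD px p.1 p.2 = L.foldl (fun m p => max m (pvD px p.1 p.2)) m := by
  induction L generalizing m with
  | nil => left; rfl
  | cons p t ih =>
    simp only [List.foldl_cons]
    rcases ih (max m (pvD px p.1 p.2)) with h | ⟨q, hq, he⟩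
    · rw [h]
      rcases le_total (pvD px p.1 p.2) m with hle | hle
      · left; exact max_eq_left hle
      · right; exact ⟨p, List.mem_cons_self, (max_eq_right hle).symm⟩
    · right; exact ⟨q, List.mem_cons_of_mem _ hq, he⟩

-- the key invariant: A's fused fold equals "max, then first pair achieving it"
lemma key (px : Int) (L : List (Int × Int)) (m a b : Int) :
    L.foldl (pvStep px) (m, a, b) =
      (let M := L.foldl (fun m p => max m (pvD px p.1 p.2)) m
       if m < M then
         match L.find? (fun p => pvD px p.1 p.2 == M) with
         | some p => (M, pvEnds px p.1 p.2)
         | none => (m, a, b)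
       else (m, a, b)) := by
  induction L generalizing m a b with
  | nil => simp
  | cons p t ih =>
    simp only [List.foldl_cons, List.find?]
    by_cases h : pvD px p.1 p.2 > m
    · have hstep : pvStep px (m, a, b) p = (pvD px p.1 p.2, pvEnds px p.1 p.2) := by
        simp [pvStep, h]
      have hmax : max m (pvD px p.1 p.2) = pvD px p.1 p.2 := max_eq_right (le_of_lt h)
      rw [hstep, ih]
      set M := t.foldl (fun m p => max m (pvD px p.1 p.2)) (pvD px p.1 p.2) with hM
      have hdM : pvD px p.1 p.2 ≤ M := le_foldl_max px t _
      have hmM : m < M := lt_of_lt_of_le h hdM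
      simp only [hmax, ← hM, if_pos hmM]
      by_cases he : pvD px p.1 p.2 = M
      · simp only [he, beq_self_eq_true]
        cases hf : t.find? (fun p => pvD px p.1 p.2 == M) with
        | none => simp
        | some q =>
          have := List.find?_some hf
          simp
      · have hlt : pvD px p.1 p.2 < M := lt_of_le_of_ne hdM he
        have hne : (pvD px p.1 p.2 == M) = false := by simp [he]
        simp only [hne, if_pos hlt]
        -- find? cannot be none: some pair in t attains M
        rcases foldl_max_mem px t (pvD px p.1 p.2) with h0 | ⟨q, hq, hqe⟩
        · rw [← hM] at h0; omega
        · rw [← hM] at hqe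
          have hs : (t.find? (fun p => pvD px p.1 p.2 == M)).isSome := by
            rw [List.find?_isSome]; exact ⟨q, hq, by simp [hqe]⟩
          cases hf : t.find? (fun p => pvD px p.1 p.2 == M) with
          | none => rw [hf] at hs; simp at hs
          | some r => simp
    · have hstep : pvStep px (m, a, b) p = (m, a, b) := by simp [pvStep, h]
      have hmax : max m (pvD px p.1 p.2) = m := max_eq_left (not_lt.mp h)
      rw [hstep, ih]
      set M := t.foldl (fun m p => max m (pvD px p.1 p.2)) m with hM
      simp only [hmax, ← hM]
      by_cases hm : m < M
      · have hne : (pvD px p.1 p.2 == M) = false := by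
          have : pvD px p.1 p.2 ≠ M := fun he => absurd (he ▸ hm) (not_lt.mpr (not_lt.mp h))
          simp [this]
        simp [hne, hm]
      · simp [hm]

-- A's double fold over aset is the single fold over the pair list
lemma double_fold (aset : List Int) (px : Int) (st : Int × Int × Int) :
    aset.foldl (fun st x1 => aset.foldl (fun st x2 => pvStep px st (x1, x2)) st) st
      = (pvPairs aset).foldl (pvStep px) st := by
  rw [pvPairs, List.foldl_flatMap]
  congr 1
  funext acc x1
  rw [List.foldl_map]

-- A's inner body is pvStep
lemma body_eq (px x1 x2 : Int) (st : Int × Int × Int) :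
    (let dist_reg := |x1 - x2|
     let dist_boundary := |(|x1 - x2|) - 2 * px|
     let dxx : Int × Int × Int :=
       if dist_reg ≤ dist_boundary then (dist_reg, min x1 x2, max x1 x2)
       else (dist_boundary, max x1 x2, min x1 x2)
     if dxx.1 > st.1 then dxx else st) = pvStep px st (x1, x2) := by
  simp only [pvStep, pvD, pvEnds, min_def]
  split_ifs <;> simp_all

lemma mem_pvPairs (l : List Int) (p : Int × Int) :
    p ∈ pvPairs l ↔ p.1 ∈ l ∧ p.2 ∈ l := by
  cases p with
  | mk a b =>
    simp only [pvPairs, List.mem_flatMap, List.mem_map]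
    constructor
    · rintro ⟨x1, h1, x2, h2, he⟩
      cases he; exact ⟨h1, h2⟩
    · rintro ⟨h1, h2⟩
      exact ⟨a, h1, b, h2, rfl⟩

-- pairs of pointwise-permuted inner lists are permuted
lemma flatMap_map_perm (l : List Int) (m m' : List Int) (h : m.Perm m') :
    (l.flatMap (fun x1 => m.map (fun x2 => (x1, x2)))).Perm
      (l.flatMap (fun x1 => m'.map (fun x2 => (x1, x2)))) := by
  induction l with
  | nil => simp
  | cons a t ih =>
    simp only [List.flatMap_cons]
    exact (h.map _).append ih

lemma pvPairs_perm (l l' : List Int) (h : l.Perm l') : (pvPairs l).Perm (pvPairs l') := by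
  unfold pvPairs
  exact (flatMap_map_perm l l l' h).trans (List.Perm.flatMap_right _ h)

lemma foldl_max_perm (px : Int) (L L' : List (Int × Int)) (h : L.Perm L') (m : Int) :
    L.foldl (fun m p => max m (pvD px p.1 p.2)) m
      = L'.foldl (fun m p => max m (pvD px p.1 p.2)) m := by
  apply h.foldl_eq'
  intro x _ y _ z
  exact max_right_comm z (pvD px x.1 x.2) (pvD px y.1 y.2)

-- ===== VERDICT (by name: the statement is the Claim_ definition above) =====
theorem num_layers_spec : Claim_equal_num_layers := by
  intro aset px _ hpre
  unfold Spec_num_layers num_layers num_layers_alt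
  simp only [body_eq]
  rw [double_fold, key]
  have hperm : (PySem.List.sorted aset (fun x => x) false).Perm aset :=
    PySem.List.sorted_perm aset (fun x => x) false
  have hpp : (pvPairs (PySem.List.sorted aset (fun x => x) false)).Perm (pvPairs aset) :=
    pvPairs_perm _ _ hperm
  set M := (pvPairs aset).foldl (fun m p => max m (pvD px p.1 p.2)) 0 with hM
  have hMS : (pvPairs (PySem.List.sorted aset (fun x => x) false)).foldl
      (fun m p => max m (pvD px p.1 p.2)) 0 = M := foldl_max_perm px _ _ hpp 0
  simp only [hMS, gt_iff_lt]
  by_cases h : (0 : Int) < M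
  · simp only [if_pos h]
    -- A's first maximal pair p
    have hsA : ((pvPairs aset).find? (fun p => pvD px p.1 p.2 == M)).isSome := by
      rw [List.find?_isSome]
      rcases foldl_max_mem px (pvPairs aset) 0 with h0 | ⟨q, hq, he⟩
      · rw [← hM] at h0; omega
      · rw [← hM] at he; exact ⟨q, hq, by simp [he]⟩
    cases hfA : (pvPairs aset).find? (fun p => pvD px p.1 p.2 == M) with
    | none => rw [hfA] at hsA; simp at hsA
    | some p =>
      -- B's first maximal pair q (in sorted order)
      have hsB : ((pvPairs (PySem.List.sorted aset (fun x => x) false)).find?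
          (fun p => pvD px p.1 p.2 == M)).isSome := by
        rw [List.find?_isSome]
        rcases foldl_max_mem px (pvPairs (PySem.List.sorted aset (fun x => x) false)) 0 with h0 | ⟨q, hq, he⟩
        · rw [hMS] at h0; omega
        · rw [hMS] at he; exact ⟨q, hq, by simp [he]⟩
      cases hfB : (pvPairs (PySem.List.sorted aset (fun x => x) false)).find?
          (fun p => pvD px p.1 p.2 == M) with
      | none => rw [hfB] at hsB; simp at hsB
      | some q =>
        obtain ⟨q1, q2⟩ := q
        have hdp : pvD px p.1 p.2 = M := by simpa using List.find?_some hfA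
        have hdq : pvD px q1 q2 = M := by simpa using List.find?_some hfB
        have hpmem := (mem_pvPairs aset p).mp (List.mem_of_find?_eq_some hfA)
        have hqmem := (mem_pvPairs _ (q1, q2)).mp (List.mem_of_find?_eq_some hfB)
        have hq1 : q1 ∈ aset := hperm.subset hqmem.1
        have hq2 : q2 ∈ aset := hperm.subset hqmem.2
        have hmaxim : ∀ z1 ∈ aset, ∀ z2 ∈ aset, pvCD px z1 z2 ≤ pvCD px p.1 p.2 := by
          intro z1 hz1 z2 hz2
          have : (z1, z2) ∈ pvPairs aset := (mem_pvPairs aset (z1, z2)).mpr ⟨hz1, hz2⟩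
          have hle := foldl_max_ge px (pvPairs aset) 0 (z1, z2) this
          dsimp only at hle
          rw [← hM] at hle
          show pvD px z1 z2 ≤ pvD px p.1 p.2
          omega
        have hends : pvEnds px p.1 p.2 = pvEnds px q1 q2 :=
          hpre p.1 hpmem.1 p.2 hpmem.2 q1 hq1 q2 hq2
            ⟨by show pvD px p.1 p.2 = pvD px q1 q2; omega, hmaxim⟩
        simp only [pvEnds] at hends
        simp only [← hends]
        rfl
  · have h0 : (0:Int) ≤ M := hM ▸ le_foldl_max px (pvPairs aset) 0
    simp only [if_neg h]
    have : M = 0 := by omega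
    simp [this]
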